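-- pv_equiv track=rewrite | github.com/ilyashirko/quiz_bot | bot_processing.py | clarify_answer
-- ===== SOURCE A (Python) =====
-- def clarify_answer(answer: str,
--                    clarify_params: list = (' - ', '. ', ' ('),
--                    clean_params: list = ('...', '"')) -> str:
--     for param in clean_params:
--         answer = ''.join(answer.split(param))
--     for param in clarify_params:
--         answer = answer.split(param)[0]
--     return answer.strip()
-- ===== SOURCE B (Python) =====
-- def clarify_answer(answer: str,
--                    clarify_params: list = (' - ', '. ', ' ('),
--                    clean_params: list = ('...', '"')) -> str:
--     def remove_all(s, p):
--         # single left-to-right scan: skip every (non-overlapping) match of p, keep other chars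
--         out = []
--         i = 0
--         while i < len(s):
--             if s.startswith(p, i):
--                 i += len(p)
--             else:
--                 out.append(s[i])
--                 i += 1
--         return ''.join(out)
--
--     def cut_at(s, p):
--         # scan for the first match position and slice once; no match -> whole string
--         for i in range(len(s) - len(p) + 1):
--             if s.startswith(p, i):
--                 return s[:i]
--         return s
--
--     for p in clean_params:
--         answer = remove_all(answer, p)
--     for p in clarify_params:
--         answer = cut_at(answer, p)
--     return answer.strip()
-- ===== Notes on version B (the rewrite author's own statement) =====
-- stated objective: alternative
-- what changed: Each library split is replaced by an explicit character-level scan: the clean phase skips matches in one pass instead of splitting into pieces and re-joining, and the clarify phase scans to the first match position and slices once instead of building the whole piece list with split and taking element 0.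
import Mathlib
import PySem

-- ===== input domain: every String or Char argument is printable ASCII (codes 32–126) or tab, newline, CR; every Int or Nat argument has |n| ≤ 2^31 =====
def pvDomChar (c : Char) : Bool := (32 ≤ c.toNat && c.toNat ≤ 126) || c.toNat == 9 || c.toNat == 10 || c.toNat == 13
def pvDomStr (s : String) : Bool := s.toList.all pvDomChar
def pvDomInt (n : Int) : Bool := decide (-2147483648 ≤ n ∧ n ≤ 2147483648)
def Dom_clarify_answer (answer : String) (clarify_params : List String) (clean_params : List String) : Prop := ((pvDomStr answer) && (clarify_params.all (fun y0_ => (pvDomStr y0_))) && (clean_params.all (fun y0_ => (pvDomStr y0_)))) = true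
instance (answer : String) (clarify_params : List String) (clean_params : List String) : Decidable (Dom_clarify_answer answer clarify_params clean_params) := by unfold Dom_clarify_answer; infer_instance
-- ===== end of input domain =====

-- B replaces each library split by one explicit character-level scan (skip-matches pass for
-- cleaning, scan-to-first-match-and-slice for truncation); same cost, different decomposition.

-- ===== PORT A =====
-- ''.join(answer.split(param)) ; split? is none only for param = "" (Python ValueError, excluded by Pre_)
def pvCleanStepA (s p : String) : String :=
  PySem.Str.join "" ((PySem.Str.split? s p).getD [s])
-- answer.split(param)[0]
def pvClarifyStepA (s p : String) : String :=
  (PySem.List.pyGet? ((PySem.Str.split? s p).getD []) 0).getD s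

def clarify_answer (answer : String) (clarify_params : List String) (clean_params : List String) : String :=
  PySem.Str.strip (clarify_params.foldl pvClarifyStepA (clean_params.foldl pvCleanStepA answer))

-- ===== PORT B =====
-- remove_all's while loop; fuel = |s| (the loop advances ≥ 1 char per step for p ≠ "";
-- the fuel-0 fallback is unreachable under Pre_ — the Python B diverges on p = '')
def pvRemoveAllGo (p : List Char) : Nat → List Char → List Char
  | _, [] => []
  | 0, l => l
  | fuel+1, c :: t =>
      if p.isPrefixOf (c :: t) then pvRemoveAllGo p fuel ((c :: t).drop p.length)
      else c :: pvRemoveAllGo p fuel t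

def pvRemoveAll (s p : String) : String :=
  String.ofList (pvRemoveAllGo p.toList s.toList.length s.toList)

-- cut_at's scan for the first match position, returning the prefix before it
def pvCutAtGo (p : List Char) : List Char → List Char
  | [] => []
  | c :: t => if p.isPrefixOf (c :: t) then [] else c :: pvCutAtGo p t

def pvCutAt (s p : String) : String :=
  String.ofList (pvCutAtGo p.toList s.toList)

def clarify_answer_alt (answer : String) (clarify_params : List String) (clean_params : List String) : String :=
  PySem.Str.strip (clarify_params.foldl pvCutAt (clean_params.foldl pvRemoveAll answer))

-- ===== PRECONDITION & SPEC =====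
-- Python's str.split raises ValueError on an empty separator, so A raises exactly when some
-- parameter is the empty string; Pre_ excludes precisely those inputs.
def Pre_clarify_answer (answer : String) (clarify_params : List String) (clean_params : List String) : Prop :=
  (∀ p ∈ clarify_params, p ≠ "") ∧ (∀ p ∈ clean_params, p ≠ "")
instance (answer : String) (clarify_params : List String) (clean_params : List String) : Decidable (Pre_clarify_answer answer clarify_params clean_params) := by unfold Pre_clarify_answer; infer_instance

def pvWitness_clarify_answer : String × List String × List String :=
  ("Paris - the capital...", [" - ", ". ", " ("], ["...", "\""])

def Spec_clarify_answer (answer : String) (clarify_params : List String) (clean_params : List String) (out : String) : Prop := out = clarify_answer_alt answer clarify_params clean_params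
instance (answer : String) (clarify_params : List String) (clean_params : List String) (out : String) : Decidable (Spec_clarify_answer answer clarify_params clean_params out) := by unfold Spec_clarify_answer; infer_instance

-- ===== CLAIM (what is proved, stated in full; the proofs are below) =====
def Claim_equal_clarify_answer : Prop := ∀ (answer : String) (clarify_params : List String) (clean_params : List String), Dom_clarify_answer answer clarify_params clean_params → Pre_clarify_answer answer clarify_params clean_params → Spec_clarify_answer answer clarify_params clean_params (clarify_answer answer clarify_params clean_params)

-- ===== LEMMAS AND PROOFS =====

-- join with empty separator is flatten
theorem pv_intercalate_nil (xs : List (List Char)) : List.intercalate ([] : List Char) xs = xs.flatten := by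
  induction xs with
  | nil => simp [List.intercalate]
  | cons a t ih =>
      cases t with
      | nil => simp [List.intercalate]
      | cons b u =>
          simp [List.intercalate, List.intersperse] at ih ⊢
          simpa using ih

-- splitOn.go only appends onto acc
theorem pv_go_acc (sep : List Char) (fuel : Nat) (l cur : List Char) (acc : List (List Char)) :
    PySem.Chars.splitOn.go sep fuel l cur acc = acc.reverse ++ PySem.Chars.splitOn.go sep fuel l cur [] := by
  induction fuel generalizing l cur acc with
  | zero => simp [PySem.Chars.splitOn.go]
  | succ f ih =>
      cases l with
      | nil => simp [PySem.Chars.splitOn.go]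
      | cons c t =>
          simp only [PySem.Chars.splitOn.go]
          by_cases h : sep.isPrefixOf (c :: t)
          · simp only [h, if_true]
            rw [ih _ _ (cur.reverse :: acc), ih _ _ [cur.reverse]]
            simp
          · simp only [h]
            exact ih _ _ _

theorem pv_fuel_irrel (p : List Char) (hp : p ≠ []) :
    ∀ f1 f2 l, l.length ≤ f1 → l.length ≤ f2 → pvRemoveAllGo p f1 l = pvRemoveAllGo p f2 l := by
  intro f1
  induction f1 with
  | zero =>
      intro f2 l h1 _
      have : l = [] := List.length_eq_zero_iff.mp (Nat.le_zero.mp h1)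
      subst this; cases f2 <;> simp [pvRemoveAllGo]
  | succ f ih =>
      intro f2 l h1 h2
      cases l with
      | nil => cases f2 <;> simp [pvRemoveAllGo]
      | cons c t =>
          cases f2 with
          | zero => simp at h2
          | succ g =>
              have hlen : 1 ≤ p.length := Nat.one_le_iff_ne_zero.mpr (by simpa using hp)
              simp only [pvRemoveAllGo]
              simp only [List.length_cons] at h1 h2
              by_cases h : p.isPrefixOf (c :: t)
              · simp only [h, if_true]
                apply ih <;> · simp only [List.length_drop, List.length_cons]; omega
              · simp only [h, Bool.false_eq_true, if_false]
                rw [ih g t (by omega) (by omega)]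

theorem pv_go_flatten (p : List Char) (hp : p ≠ []) :
    ∀ fuel l cur, l.length < fuel →
      (PySem.Chars.splitOn.go p fuel l cur []).flatten = cur.reverse ++ pvRemoveAllGo p fuel l := by
  intro fuel
  induction fuel with
  | zero => intro l cur h; exact absurd h (Nat.not_lt_zero _)
  | succ f ih =>
      intro l cur h
      cases l with
      | nil => simp [PySem.Chars.splitOn.go, pvRemoveAllGo]
      | cons c t =>
          simp only [PySem.Chars.splitOn.go, pvRemoveAllGo]
          have hlen : 1 ≤ p.length := Nat.one_le_iff_ne_zero.mpr (by simpa using hp)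
          by_cases hpre : p.isPrefixOf (c :: t)
          · simp only [hpre, if_true]
            rw [pv_go_acc]
            have hdrop : ((c :: t).drop p.length).length < f := by
              have := List.length_drop (l := c :: t) (i := p.length)
              simp only [List.length_cons] at this h ⊢
              omega
            simp only [List.flatten_append]
            rw [ih _ [] hdrop]
            simp
          · simp only [hpre, Bool.false_eq_true, if_false]
            rw [ih t (c :: cur) (by simp at h ⊢; omega)]
            simp

theorem pv_go_head (p : List Char) (hp : p ≠ []) :
    ∀ fuel l cur, l.length < fuel →
      (PySem.Chars.splitOn.go p fuel l cur []).head? = some (cur.reverse ++ pvCutAtGo p l) := by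
  intro fuel
  induction fuel with
  | zero => intro l cur h; exact absurd h (Nat.not_lt_zero _)
  | succ f ih =>
      intro l cur h
      cases l with
      | nil => simp [PySem.Chars.splitOn.go, pvCutAtGo]
      | cons c t =>
          simp only [PySem.Chars.splitOn.go, pvCutAtGo]
          by_cases hpre : p.isPrefixOf (c :: t)
          · simp only [hpre, if_true]
            rw [pv_go_acc]
            simp
          · simp only [hpre, Bool.false_eq_true, if_false]
            rw [ih t (c :: cur) (by simp at h ⊢; omega)]
            simp

theorem pv_toList_ne_nil {p : String} (hp : p ≠ "") : p.toList ≠ [] := by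
  intro h
  apply hp
  have := congrArg String.ofList h
  simpa using this

theorem pv_clean_step (s p : String) (hp : p ≠ "") : pvCleanStepA s p = pvRemoveAll s p := by
  have hpl : p.toList ≠ [] := pv_toList_ne_nil hp
  unfold pvCleanStepA pvRemoveAll
  rw [PySem.Str.split?]
  rw [PySem.Chars.split?]
  rw [if_neg (by simpa using hpl)]
  simp only [Option.map_some, Option.getD_some]
  rw [PySem.Str.join]
  simp only [List.map_map]
  have hmap : (List.map (String.toList ∘ String.ofList) (PySem.Chars.splitOn s.toList p.toList))
      = PySem.Chars.splitOn s.toList p.toList := by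
    simp [Function.comp_def]
  rw [hmap]
  congr 1
  rw [PySem.Chars.join]
  have hnil : ("" : String).toList = [] := rfl
  rw [hnil, pv_intercalate_nil]
  rw [PySem.Chars.splitOn]
  rw [pv_go_flatten p.toList hpl _ _ [] (by omega)]
  simp only [List.reverse_nil, List.nil_append]
  exact pv_fuel_irrel p.toList hpl _ _ _ (by omega) (by omega)

theorem pv_clarify_step (s p : String) (hp : p ≠ "") : pvClarifyStepA s p = pvCutAt s p := by
  have hpl : p.toList ≠ [] := pv_toList_ne_nil hp
  unfold pvClarifyStepA pvCutAt
  rw [PySem.Str.split?]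
  rw [PySem.Chars.split?]
  rw [if_neg (by simpa using hpl)]
  simp only [Option.map_some, Option.getD_some]
  have hhead : (PySem.Chars.splitOn s.toList p.toList).head? = some (pvCutAtGo p.toList s.toList) := by
    rw [PySem.Chars.splitOn]
    have := pv_go_head p.toList hpl (s.toList.length + 1) s.toList [] (by omega)
    simpa using this
  have h0 : PySem.List.pyGet? (List.map String.ofList (PySem.Chars.splitOn s.toList p.toList)) (0 : Int)
      = some (String.ofList (pvCutAtGo p.toList s.toList)) := by
    simp [PySem.List.pyGet?, PySem.List.pyIdx?]
    cases hsp : PySem.Chars.splitOn s.toList p.toList with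
    | nil => simp [hsp] at hhead
    | cons a l =>
        rw [hsp] at hhead
        simp at hhead
        subst hhead
        simp
  rw [h0]
  simp

theorem pv_foldl_congr {α β : Type} (L : List β) (f g : α → β → α) (P : β → Prop)
    (hL : ∀ x ∈ L, P x) (hfg : ∀ a x, P x → f a x = g a x) :
    ∀ a, L.foldl f a = L.foldl g a := by
  induction L with
  | nil => intro a; rfl
  | cons x t ih =>
      intro a
      simp only [List.foldl_cons]
      rw [hfg a x (hL x (by simp))]
      exact ih (fun y hy => hL y (by simp [hy])) _

-- ===== VERDICT (by name: the statement is the Claim_ definition above) =====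
theorem clarify_answer_spec : Claim_equal_clarify_answer := by
  intro answer clarify_params clean_params _ hpre
  unfold Spec_clarify_answer
  unfold clarify_answer clarify_answer_alt
  rw [pv_foldl_congr clean_params pvCleanStepA pvRemoveAll (fun p => p ≠ "") hpre.2
      (fun a x hx => pv_clean_step a x hx)]
  rw [pv_foldl_congr clarify_params pvClarifyStepA pvCutAt (fun p => p ≠ "") hpre.1
      (fun a x hx => pv_clarify_step a x hx)]
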